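-- pv_equiv track=rewrite | github.com/clarson20/Tic-Tac-Toe | ticTacToe.py | hardCPUDefense
-- ===== SOURCE A (Python) =====
-- def placeMarker(boardValues, boardLocation, userLetter): #requires tuple as boardLocation
--     boardValues[boardLocation[0]][boardLocation[1]] = userLetter
--
-- def vertCheck(boardValues,XY,whichCol):
--     counter = 0
--     for row in boardValues:
--         if row[whichCol] == XY:
--             counter += 1
--     return counter
--
-- def rowCheck(boardValues, XY,whichRow):
--     counter = 0
--     row = boardValues[whichRow]
--     for col in row:
--          if col == XY:
--             counter += 1
--     return counter
--
-- def crossCheck (boardValues, XY, left_or_right):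
--     counter = 0
--     if left_or_right == "left" or left_or_right == "Left":
--         for i in range(0,3):
--             if boardValues[i][i] == XY:
--                 counter += 1
--         return counter
--     elif left_or_right == "right" or left_or_right == "Right":
--         reverse_iterator = 2
--         for i in range (0,3):
--             if boardValues[i][reverse_iterator] == XY:
--               counter += 1
--             reverse_iterator -= 1
--         return counter
--
-- def vertCheckCPU(boardValues, whichCol):
--     for row_index, row in enumerate(boardValues):
--         if row[whichCol] != "X" and row[whichCol] != "O":
--             return (row_index, whichCol)
--     return None
--
-- def rowCheckCPU(boardValues,whichRow):
--     row = boardValues[whichRow]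
--     for col_index, col in enumerate(row):
--         if col != "X" and col != "O":
--             return (whichRow, col_index)
--     return None
--
-- def crossCheckCPU(boardValues, left_or_right):
--     if left_or_right == "left" or left_or_right == "Left":
--         for i in range(0,3):
--             if boardValues[i][i] != "X" and boardValues[i][i] != "O":
--                 return (i,i)
--     elif left_or_right == "right" or left_or_right == "Right":
--         reverse_iterator = 2
--         for i in range (0,3):
--             if boardValues[i][reverse_iterator] != "X" and boardValues[i][reverse_iterator] != "O":
--               return (i, reverse_iterator)
--             reverse_iterator -= 1
--     return None
--
-- def hardCPUDefense(boardValues, userLetter, CPULetter): #checks for open spaces to stop a user win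
--     for i in range(0,3): #checks for rows
--         if rowCheck(boardValues, userLetter, i) == 2:
--             winningSpace = rowCheckCPU(boardValues, i)
--             if winningSpace is not None:
--                 placeMarker(boardValues, winningSpace, CPULetter)
--                 return True
--     for i in range (0,3): #checks for columns
--         if vertCheck(boardValues, userLetter, i) == 2:
--             winningSpace = vertCheckCPU(boardValues, i)
--             if winningSpace is not None:
--                 placeMarker(boardValues, winningSpace, CPULetter)
--                 return True
--     if crossCheck(boardValues, userLetter, "left") == 2: # top left to bottom right cross
--         winningSpace = crossCheckCPU(boardValues, "left")
--         if winningSpace is not None: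
--             placeMarker(boardValues, winningSpace, CPULetter)
--             return True
--     if crossCheck(boardValues, userLetter, "right") == 2: # top right to bottom left cross
--         winningSpace = crossCheckCPU(boardValues, "right")
--         if winningSpace is not None:
--             placeMarker(boardValues, winningSpace, CPULetter)
--             return True
--     return False
-- ===== SOURCE B (Python) =====
-- def hardCPUDefense(boardValues, userLetter, CPULetter):
--     # Per-line statistics instead of per-line scans: one row-major sweep collects,
--     # for each row and column line, the userLetter count and the first open cell;
--     # the two diagonals are just three direct cell reads each.  The decision phase
--     # then only looks at these statistics.  Mutates boardValues exactly like the
--     # original (places CPULetter on the same cell).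
--     r0 = r1 = r2 = c0 = c1 = c2 = 0
--     er0 = er1 = er2 = ec0 = ec1 = ec2 = None
--     for r, row in enumerate(boardValues):
--         for c, v in enumerate(row):
--             mark = 1 if v == userLetter else 0
--             empty = v != "X" and v != "O"
--             if r == 0:
--                 r0 += mark
--                 if empty and er0 is None: er0 = (r, c)
--             elif r == 1:
--                 r1 += mark
--                 if empty and er1 is None: er1 = (r, c)
--             elif r == 2:
--                 r2 += mark
--                 if empty and er2 is None: er2 = (r, c)
--             if c == 0:
--                 c0 += mark
--                 if empty and ec0 is None: ec0 = (r, c)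
--             elif c == 1:
--                 c1 += mark
--                 if empty and ec1 is None: ec1 = (r, c)
--             elif c == 2:
--                 c2 += mark
--                 if empty and ec2 is None: ec2 = (r, c)
--     diag1 = [(0, 0), (1, 1), (2, 2)]
--     diag2 = [(0, 2), (1, 1), (2, 0)]
--     d1 = sum(1 for (a, b) in diag1 if boardValues[a][b] == userLetter)
--     d2 = sum(1 for (a, b) in diag2 if boardValues[a][b] == userLetter)
--     ed1 = next(((a, b) for (a, b) in diag1
--                 if boardValues[a][b] != "X" and boardValues[a][b] != "O"), None)
--     ed2 = next(((a, b) for (a, b) in diag2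
--                 if boardValues[a][b] != "X" and boardValues[a][b] != "O"), None)
--     for cnt, e in ((r0, er0), (r1, er1), (r2, er2),
--                    (c0, ec0), (c1, ec1), (c2, ec2),
--                    (d1, ed1), (d2, ed2)):
--         if cnt == 2 and e is not None:
--             boardValues[e[0]][e[1]] = CPULetter
--             return True
--     return False
-- ===== Notes on version B (the rewrite author's own statement) =====
-- stated objective: alternative
-- what changed: Replaces A's eight separate per-line board scans (a counting helper plus an empty-cell helper for each row, column and diagonal) with one row-major sweep that accumulates per-row/column userLetter counts and first-open-cell positions, three direct cell reads per diagonal, and a board-free decision phase over those statistics.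
-- outside the precondition, e.g. on hardCPUDefense([['X', 'X', ' ']], 'X', 'O'): A returns True, B raises IndexError
import Mathlib
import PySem

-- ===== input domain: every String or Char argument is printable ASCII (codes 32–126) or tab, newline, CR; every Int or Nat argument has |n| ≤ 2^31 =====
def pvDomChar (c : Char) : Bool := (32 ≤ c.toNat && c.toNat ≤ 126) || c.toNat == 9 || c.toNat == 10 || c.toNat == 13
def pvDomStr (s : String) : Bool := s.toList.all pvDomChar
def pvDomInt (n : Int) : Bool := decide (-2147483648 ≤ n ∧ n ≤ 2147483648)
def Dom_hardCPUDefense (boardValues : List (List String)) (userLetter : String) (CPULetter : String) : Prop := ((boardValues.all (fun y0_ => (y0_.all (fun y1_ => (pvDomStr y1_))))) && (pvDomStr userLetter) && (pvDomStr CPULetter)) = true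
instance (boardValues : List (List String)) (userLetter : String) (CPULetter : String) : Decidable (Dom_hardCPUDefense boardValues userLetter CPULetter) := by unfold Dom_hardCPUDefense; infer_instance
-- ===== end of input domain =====

-- ===== PORT A =====
-- B replaces A's eight per-line board scans (helper pairs rowCheck/rowCheckCPU, vertCheck/vertCheckCPU,
-- crossCheck/crossCheckCPU) by ONE row-major sweep over the board that accumulates, for each of the 8
-- winning lines, the userLetter count and the first open cell, followed by a decision phase that reads
-- only these statistics (objective: alternative; no speed claim).
-- Both Pythons mutate boardValues identically (CPULetter onto the same cell); equivalence proved here is about the return value.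
-- Out-of-range indexing in A (Python IndexError) is modelled with .getD defaults; Pre_ excludes those inputs.
def rowCheckP (boardValues : List (List String)) (XY : String) (whichRow : Int) : Int :=
  ((PySem.List.pyGet? boardValues whichRow).getD []).foldl
    (fun counter col => if col == XY then counter + 1 else counter) 0

def vertCheckP (boardValues : List (List String)) (XY : String) (whichCol : Int) : Int :=
  boardValues.foldl
    (fun counter row => if (PySem.List.pyGet? row whichCol).getD "" == XY then counter + 1 else counter) 0

def crossCheckP (boardValues : List (List String)) (XY : String) (lr : String) : Option Int :=
  if lr == "left" || lr == "Left" then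
    some ((PySem.List.pyRange 0 3 1).foldl (fun counter i =>
      if (PySem.List.pyGet? ((PySem.List.pyGet? boardValues i).getD []) i).getD "" == XY
      then counter + 1 else counter) 0)
  else if lr == "right" || lr == "Right" then
    -- reverse_iterator starts at 2 and decreases with i, i.e. equals 2 - i
    some ((PySem.List.pyRange 0 3 1).foldl (fun counter i =>
      if (PySem.List.pyGet? ((PySem.List.pyGet? boardValues i).getD []) (2 - i)).getD "" == XY
      then counter + 1 else counter) 0)
  else none

def rowCheckCPUP (boardValues : List (List String)) (whichRow : Int) : Option (Int × Int) :=
  (PySem.List.enumerate ((PySem.List.pyGet? boardValues whichRow).getD [])).findSome?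
    (fun p => if p.2 != "X" && p.2 != "O" then some (whichRow, p.1) else none)

def vertCheckCPUP (boardValues : List (List String)) (whichCol : Int) : Option (Int × Int) :=
  (PySem.List.enumerate boardValues).findSome?
    (fun p => if (PySem.List.pyGet? p.2 whichCol).getD "" != "X" && (PySem.List.pyGet? p.2 whichCol).getD "" != "O"
              then some (p.1, whichCol) else none)

def crossCheckCPUP (boardValues : List (List String)) (lr : String) : Option (Int × Int) :=
  if lr == "left" || lr == "Left" then
    (PySem.List.pyRange 0 3 1).findSome? (fun i =>
      if (PySem.List.pyGet? ((PySem.List.pyGet? boardValues i).getD []) i).getD "" != "X" &&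
         (PySem.List.pyGet? ((PySem.List.pyGet? boardValues i).getD []) i).getD "" != "O"
      then some (i, i) else none)
  else if lr == "right" || lr == "Right" then
    (PySem.List.pyRange 0 3 1).findSome? (fun i =>
      if (PySem.List.pyGet? ((PySem.List.pyGet? boardValues i).getD []) (2 - i)).getD "" != "X" &&
         (PySem.List.pyGet? ((PySem.List.pyGet? boardValues i).getD []) (2 - i)).getD "" != "O"
      then some (i, 2 - i) else none)
  else none

def hardCPUDefense (boardValues : List (List String)) (userLetter : String) (CPULetter : String) : Bool :=
  if (PySem.List.pyRange 0 3 1).any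
       (fun i => rowCheckP boardValues userLetter i == 2 && (rowCheckCPUP boardValues i).isSome) then true
  else if (PySem.List.pyRange 0 3 1).any
       (fun i => vertCheckP boardValues userLetter i == 2 && (vertCheckCPUP boardValues i).isSome) then true
  else if crossCheckP boardValues userLetter "left" == some 2 && (crossCheckCPUP boardValues "left").isSome then true
  else if crossCheckP boardValues userLetter "right" == some 2 && (crossCheckCPUP boardValues "right").isSome then true
  else false

-- ===== PORT B =====
-- Source B's sweep state: per-row/column userLetter counts and first open cell (None until seen).
structure PVSweep where
  r0 : Int
  r1 : Int
  r2 : Int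
  c0 : Int
  c1 : Int
  c2 : Int
  er0 : Option (Int × Int)
  er1 : Option (Int × Int)
  er2 : Option (Int × Int)
  ec0 : Option (Int × Int)
  ec1 : Option (Int × Int)
  ec2 : Option (Int × Int)
deriving Repr

def pvMark (u v : String) : Int := if v == u then 1 else 0

def pvEmpty (v : String) : Bool := v != "X" && v != "O"

-- the 'if r == 0: … elif r == 1: … elif r == 2: …' statement of Source B's cell body
def pvStepRow (u : String) (r c : Int) (v : String) (σ : PVSweep) : PVSweep :=
  if r == 0 then { σ with r0 := σ.r0 + pvMark u v, er0 := if pvEmpty v && σ.er0.isNone then some (r, c) else σ.er0 }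
  else if r == 1 then { σ with r1 := σ.r1 + pvMark u v, er1 := if pvEmpty v && σ.er1.isNone then some (r, c) else σ.er1 }
  else if r == 2 then { σ with r2 := σ.r2 + pvMark u v, er2 := if pvEmpty v && σ.er2.isNone then some (r, c) else σ.er2 }
  else σ

-- the 'if c == 0: … elif c == 1: … elif c == 2: …' statement
def pvStepCol (u : String) (r c : Int) (v : String) (σ : PVSweep) : PVSweep :=
  if c == 0 then { σ with c0 := σ.c0 + pvMark u v, ec0 := if pvEmpty v && σ.ec0.isNone then some (r, c) else σ.ec0 }
  else if c == 1 then { σ with c1 := σ.c1 + pvMark u v, ec1 := if pvEmpty v && σ.ec1.isNone then some (r, c) else σ.ec1 }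
  else if c == 2 then { σ with c2 := σ.c2 + pvMark u v, ec2 := if pvEmpty v && σ.ec2.isNone then some (r, c) else σ.ec2 }
  else σ

-- the body of the inner 'for c, v in enumerate(row)' loop
def pvCellStep (u : String) (r c : Int) (v : String) (σ : PVSweep) : PVSweep :=
  pvStepCol u r c v (pvStepRow u r c v σ)

def pvRowSweep (u : String) (r : Int) (σ : PVSweep) (row : List String) : PVSweep :=
  (PySem.List.enumerate row 0).foldl (fun σ p => pvCellStep u r p.1 p.2 σ) σ

def pvInit : PVSweep := ⟨0, 0, 0, 0, 0, 0, none, none, none, none, none, none⟩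

-- the outer 'for r, row in enumerate(boardValues)' loop
def pvSweep (u : String) (bv : List (List String)) : PVSweep :=
  (PySem.List.enumerate bv 0).foldl (fun σ q => pvRowSweep u q.1 σ q.2) pvInit

def pvDiag1 : List (Int × Int) := [(0, 0), (1, 1), (2, 2)]

def pvDiag2 : List (Int × Int) := [(0, 2), (1, 1), (2, 0)]

-- boardValues[a][b]; Source B raises IndexError on a missing cell — modelled with defaults, meaningful only inside Pre_
def pvCellAt (bv : List (List String)) (p : Int × Int) : String :=
  (PySem.List.pyGet? ((PySem.List.pyGet? bv p.1).getD []) p.2).getD ""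

-- the decision loop over the 8 (cnt, e) pairs, unrolled
def hardCPUDefense_alt (boardValues : List (List String)) (userLetter : String) (CPULetter : String) : Bool :=
  let σ := pvSweep userLetter boardValues
  let d1 : Int := (pvDiag1.countP (fun p => pvCellAt boardValues p == userLetter) : Int)
  let d2 : Int := (pvDiag2.countP (fun p => pvCellAt boardValues p == userLetter) : Int)
  let ed1 := pvDiag1.findSome? (fun p =>
    if pvCellAt boardValues p != "X" && pvCellAt boardValues p != "O" then some p else none)
  let ed2 := pvDiag2.findSome? (fun p =>
    if pvCellAt boardValues p != "X" && pvCellAt boardValues p != "O" then some p else none)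
  if σ.r0 == 2 && σ.er0.isSome then true
  else if σ.r1 == 2 && σ.er1.isSome then true
  else if σ.r2 == 2 && σ.er2.isSome then true
  else if σ.c0 == 2 && σ.ec0.isSome then true
  else if σ.c1 == 2 && σ.ec1.isSome then true
  else if σ.c2 == 2 && σ.ec2.isSome then true
  else if d1 == 2 && ed1.isSome then true
  else if d2 == 2 && ed2.isSome then true
  else false

-- ===== PRECONDITION & SPEC =====
-- Pre_ keeps the proper boards (at least 3 rows, every row at least 3 wide): outside them A raises
-- IndexError except when an early two-in-a-row lets it return True before touching a missing cell,
-- and on exactly those early-exit boards the natural B itself raises (its diagonal reads need the 3×3 core).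
def Pre_hardCPUDefense (boardValues : List (List String)) (userLetter : String) (CPULetter : String) : Prop :=
  3 ≤ boardValues.length ∧ ∀ row ∈ boardValues, 3 ≤ row.length
instance (boardValues : List (List String)) (userLetter : String) (CPULetter : String) : Decidable (Pre_hardCPUDefense boardValues userLetter CPULetter) := by unfold Pre_hardCPUDefense; infer_instance

def pvWitness_hardCPUDefense : List (List String) × String × String :=
  ([["X", "X", " "], [" ", " ", " "], [" ", " ", " "]], "X", "O")

def Spec_hardCPUDefense (boardValues : List (List String)) (userLetter : String) (CPULetter : String) (out : Bool) : Prop := out = hardCPUDefense_alt boardValues userLetter CPULetter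
instance (boardValues : List (List String)) (userLetter : String) (CPULetter : String) (out : Bool) : Decidable (Spec_hardCPUDefense boardValues userLetter CPULetter out) := by unfold Spec_hardCPUDefense; infer_instance

-- ===== CLAIM (what is proved, stated in full; the proofs are below) =====
def Claim_equal_hardCPUDefense : Prop := ∀ (boardValues : List (List String)) (userLetter : String) (CPULetter : String), Dom_hardCPUDefense boardValues userLetter CPULetter → Pre_hardCPUDefense boardValues userLetter CPULetter → Spec_hardCPUDefense boardValues userLetter CPULetter (hardCPUDefense boardValues userLetter CPULetter)


-- ===== LEMMAS AND PROOFS =====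
-- generic fold lemmas ---------------------------------------------------------

theorem pv_foldl_proj {S A β : Type} (p : S → β) (F : S → A → S) (f : β → A → β)
    (h : ∀ σ x, p (F σ x) = f (p σ) x) :
    ∀ (l : List A) (σ : S), p (l.foldl F σ) = l.foldl f (p σ) := by
  intro l
  induction l with
  | nil => intro σ; rfl
  | cons x xs ih => intro σ; simp only [List.foldl_cons, ih, h]

theorem pv_foldl_id {A β : Type} : ∀ (l : List A) (b : β), l.foldl (fun b _ => b) b = b := by
  intro l
  induction l with
  | nil => intro b; rfl
  | cons x xs ih => intro b; simpa using ih b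

theorem pv_foldl_count {A : Type} (p : A → Bool) :
    ∀ (l : List A) (n : Int),
      l.foldl (fun n x => n + (if p x then (1 : Int) else 0)) n = n + (l.countP p : Int) := by
  intro l
  induction l with
  | nil => intro n; simp
  | cons x xs ih =>
    intro n
    cases h : p x <;> simp [h, ih, List.countP_cons] <;> ring

theorem pv_first_absorb {A B : Type} (step : Option B → A → Option B)
    (hstep : ∀ (b : B) (x : A), step (some b) x = some b) :
    ∀ (l : List A) (b : B), l.foldl step (some b) = some b := by
  intro l
  induction l with
  | nil => intro b; rfl
  | cons x xs ih => intro b; rw [List.foldl_cons, hstep]; exact ih b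

theorem pv_row_first_isSome {A : Type} (g : A → Bool) (j : Int) :
    ∀ (l : List (Int × A)),
      (l.foldl (fun o x => if g x.2 && o.isNone then some (j, x.1) else o) none).isSome
        = l.any (fun x => g x.2) := by
  intro l
  induction l with
  | nil => rfl
  | cons x xs ih =>
    rw [List.foldl_cons, List.any_cons]
    cases h : g x.2
    · simp only [h, Bool.false_and, Bool.false_eq_true, if_false, ih, Bool.false_or]
    · simp only [h, Option.isNone_none, Bool.and_true, Bool.true_and, if_true, Bool.true_or]
      rw [pv_first_absorb _ (by intro b y; simp) xs (j, x.1)]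
      rfl

theorem pv_col_first_isSome {A : Type} (g : A → Bool) (j : Int) :
    ∀ (l : List (Int × A)),
      (l.foldl (fun o x => if g x.2 && o.isNone then some (x.1, j) else o) none).isSome
        = l.any (fun x => g x.2) := by
  intro l
  induction l with
  | nil => rfl
  | cons x xs ih =>
    rw [List.foldl_cons, List.any_cons]
    cases h : g x.2
    · simp only [h, Bool.false_and, Bool.false_eq_true, if_false, ih, Bool.false_or]
    · simp only [h, Option.isNone_none, Bool.and_true, Bool.true_and, if_true, Bool.true_or]
      rw [pv_first_absorb _ (by intro b y; simp) xs (x.1, j)]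
      rfl

theorem isSome_findSome?_if {α β : Type} (q : α → Bool) (f : α → β) (l : List α) :
    (List.findSome? (fun x => if q x then some (f x) else none) l).isSome = l.any q := by
  induction l with
  | nil => simp
  | cons x xs ih => cases h : q x <;> simp [h, ih]

theorem any_enumerate_snd {α : Type} (q : α → Bool) (l : List α) : ∀ (s : Int),
    (PySem.List.enumerate l s).any (fun p => q p.2) = l.any q := by
  induction l with
  | nil => intro s; simp [PySem.List.enumerate_nil]
  | cons x xs ih => intro s; simp [PySem.List.enumerate_cons, ih]

theorem pv_foldl_enum_snd {A β : Type} (h : β → A → β) (l : List A) (s : Int) (b : β) :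
    (PySem.List.enumerate l s).foldl (fun b p => h b p.2) b = l.foldl h b := by
  conv_rhs => rw [← PySem.List.map_snd_enumerate l s]
  rw [List.foldl_map]

theorem pv_foldl_enum_noop {A β : Type} (f : β → Int × A → β) (j : Int) :
    ∀ (l : List A) (s : Int) (b : β), j < s →
      (PySem.List.enumerate l s).foldl (fun b p => if p.1 == j then f b p else b) b = b := by
  intro l
  induction l with
  | nil => intro s b _; rfl
  | cons x xs ih =>
    intro s b hs
    rw [PySem.List.enumerate_cons]
    have hne : ((s == j) : Bool) = false := by simp only [beq_eq_false_iff_ne]; omega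
    simp only [List.foldl_cons, hne, Bool.false_eq_true, if_false]
    exact ih (s + 1) b (by omega)

theorem pv_foldl_enum_single {A β : Type} (f : β → Int × A → β) (j : Int) :
    ∀ (l : List A) (s : Int) (b : β), s ≤ j →
      (PySem.List.enumerate l s).foldl (fun b p => if p.1 == j then f b p else b) b
        = (match l[(j - s).toNat]? with
           | some v => f b (j, v)
           | none => b) := by
  intro l
  induction l with
  | nil => intro s b _; rfl
  | cons x xs ih =>
    intro s b hs
    rw [PySem.List.enumerate_cons]
    by_cases hsj : s = j
    · have h0 : (j - s).toNat = 0 := by omega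
      simp only [List.foldl_cons, hsj, beq_self_eq_true, if_true]
      have h0' : (j - j).toNat = 0 := by omega
      simp only [h0', List.getElem?_cons_zero]
      exact pv_foldl_enum_noop f j xs (j + 1) (f b (j, x)) (by omega)
    · have hne : ((s == j) : Bool) = false := by simp only [beq_eq_false_iff_ne]; omega
      have hsub : (j - s).toNat = (j - (s + 1)).toNat + 1 := by omega
      simp only [List.foldl_cons, hne, Bool.false_eq_true, if_false, hsub,
        List.getElem?_cons_succ]
      exact ih (s + 1) b (by omega)

theorem pv_cast_beq2 (n : Nat) : (((n : Int)) == 2) = (n == 2) := by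
  by_cases h : n = 2 <;> simp [h] <;> omega

theorem int_count_beq (n : Nat) : (((0 : Int) + (n : Int)) == 2) = (n == 2) := by
  by_cases h : n = 2 <;> simp [h] <;> omega
theorem pvStepRow_c0 (u : String) (r c : Int) (v : String) (σ : PVSweep) : (pvStepRow u r c v σ).c0 = σ.c0 := by
  unfold pvStepRow; split_ifs <;> rfl

theorem pvStepRow_c1 (u : String) (r c : Int) (v : String) (σ : PVSweep) : (pvStepRow u r c v σ).c1 = σ.c1 := by
  unfold pvStepRow; split_ifs <;> rfl

theorem pvStepRow_c2 (u : String) (r c : Int) (v : String) (σ : PVSweep) : (pvStepRow u r c v σ).c2 = σ.c2 := by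
  unfold pvStepRow; split_ifs <;> rfl

theorem pvStepRow_ec0 (u : String) (r c : Int) (v : String) (σ : PVSweep) : (pvStepRow u r c v σ).ec0 = σ.ec0 := by
  unfold pvStepRow; split_ifs <;> rfl

theorem pvStepRow_ec1 (u : String) (r c : Int) (v : String) (σ : PVSweep) : (pvStepRow u r c v σ).ec1 = σ.ec1 := by
  unfold pvStepRow; split_ifs <;> rfl

theorem pvStepRow_ec2 (u : String) (r c : Int) (v : String) (σ : PVSweep) : (pvStepRow u r c v σ).ec2 = σ.ec2 := by
  unfold pvStepRow; split_ifs <;> rfl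

theorem pvStepCol_r0 (u : String) (r c : Int) (v : String) (σ : PVSweep) : (pvStepCol u r c v σ).r0 = σ.r0 := by
  unfold pvStepCol; split_ifs <;> rfl

theorem pvStepCol_r1 (u : String) (r c : Int) (v : String) (σ : PVSweep) : (pvStepCol u r c v σ).r1 = σ.r1 := by
  unfold pvStepCol; split_ifs <;> rfl

theorem pvStepCol_r2 (u : String) (r c : Int) (v : String) (σ : PVSweep) : (pvStepCol u r c v σ).r2 = σ.r2 := by
  unfold pvStepCol; split_ifs <;> rfl

theorem pvStepCol_er0 (u : String) (r c : Int) (v : String) (σ : PVSweep) : (pvStepCol u r c v σ).er0 = σ.er0 := by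
  unfold pvStepCol; split_ifs <;> rfl

theorem pvStepCol_er1 (u : String) (r c : Int) (v : String) (σ : PVSweep) : (pvStepCol u r c v σ).er1 = σ.er1 := by
  unfold pvStepCol; split_ifs <;> rfl

theorem pvStepCol_er2 (u : String) (r c : Int) (v : String) (σ : PVSweep) : (pvStepCol u r c v σ).er2 = σ.er2 := by
  unfold pvStepCol; split_ifs <;> rfl

theorem pvStepRow_r0 (u : String) (r c : Int) (v : String) (σ : PVSweep) : (pvStepRow u r c v σ).r0 = if r == 0 then σ.r0 + pvMark u v else σ.r0 := by
  unfold pvStepRow; split_ifs <;> simp_all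

theorem pvStepRow_r1 (u : String) (r c : Int) (v : String) (σ : PVSweep) : (pvStepRow u r c v σ).r1 = if r == 1 then σ.r1 + pvMark u v else σ.r1 := by
  unfold pvStepRow; split_ifs <;> simp_all

theorem pvStepRow_r2 (u : String) (r c : Int) (v : String) (σ : PVSweep) : (pvStepRow u r c v σ).r2 = if r == 2 then σ.r2 + pvMark u v else σ.r2 := by
  unfold pvStepRow; split_ifs <;> simp_all

theorem pvStepRow_er0 (u : String) (r c : Int) (v : String) (σ : PVSweep) : (pvStepRow u r c v σ).er0 = if r == 0 then (if pvEmpty v && σ.er0.isNone then some (r, c) else σ.er0) else σ.er0 := by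
  unfold pvStepRow; split_ifs <;> simp_all

theorem pvStepRow_er1 (u : String) (r c : Int) (v : String) (σ : PVSweep) : (pvStepRow u r c v σ).er1 = if r == 1 then (if pvEmpty v && σ.er1.isNone then some (r, c) else σ.er1) else σ.er1 := by
  unfold pvStepRow; split_ifs <;> simp_all

theorem pvStepRow_er2 (u : String) (r c : Int) (v : String) (σ : PVSweep) : (pvStepRow u r c v σ).er2 = if r == 2 then (if pvEmpty v && σ.er2.isNone then some (r, c) else σ.er2) else σ.er2 := by
  unfold pvStepRow; split_ifs <;> simp_all

theorem pvStepCol_c0 (u : String) (r c : Int) (v : String) (σ : PVSweep) : (pvStepCol u r c v σ).c0 = if c == 0 then σ.c0 + pvMark u v else σ.c0 := by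
  unfold pvStepCol; split_ifs <;> simp_all

theorem pvStepCol_c1 (u : String) (r c : Int) (v : String) (σ : PVSweep) : (pvStepCol u r c v σ).c1 = if c == 1 then σ.c1 + pvMark u v else σ.c1 := by
  unfold pvStepCol; split_ifs <;> simp_all

theorem pvStepCol_c2 (u : String) (r c : Int) (v : String) (σ : PVSweep) : (pvStepCol u r c v σ).c2 = if c == 2 then σ.c2 + pvMark u v else σ.c2 := by
  unfold pvStepCol; split_ifs <;> simp_all

theorem pvStepCol_ec0 (u : String) (r c : Int) (v : String) (σ : PVSweep) : (pvStepCol u r c v σ).ec0 = if c == 0 then (if pvEmpty v && σ.ec0.isNone then some (r, c) else σ.ec0) else σ.ec0 := by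
  unfold pvStepCol; split_ifs <;> simp_all

theorem pvStepCol_ec1 (u : String) (r c : Int) (v : String) (σ : PVSweep) : (pvStepCol u r c v σ).ec1 = if c == 1 then (if pvEmpty v && σ.ec1.isNone then some (r, c) else σ.ec1) else σ.ec1 := by
  unfold pvStepCol; split_ifs <;> simp_all

theorem pvStepCol_ec2 (u : String) (r c : Int) (v : String) (σ : PVSweep) : (pvStepCol u r c v σ).ec2 = if c == 2 then (if pvEmpty v && σ.ec2.isNone then some (r, c) else σ.ec2) else σ.ec2 := by
  unfold pvStepCol; split_ifs <;> simp_all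

theorem pvCell_r0 (u : String) (r c : Int) (v : String) (σ : PVSweep) : (pvCellStep u r c v σ).r0 = if r == 0 then σ.r0 + pvMark u v else σ.r0 := by
  simp [pvCellStep, pvStepCol_r0, pvStepRow_r0]

theorem pvCell_r1 (u : String) (r c : Int) (v : String) (σ : PVSweep) : (pvCellStep u r c v σ).r1 = if r == 1 then σ.r1 + pvMark u v else σ.r1 := by
  simp [pvCellStep, pvStepCol_r1, pvStepRow_r1]

theorem pvCell_r2 (u : String) (r c : Int) (v : String) (σ : PVSweep) : (pvCellStep u r c v σ).r2 = if r == 2 then σ.r2 + pvMark u v else σ.r2 := by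
  simp [pvCellStep, pvStepCol_r2, pvStepRow_r2]

theorem pvCell_er0 (u : String) (r c : Int) (v : String) (σ : PVSweep) : (pvCellStep u r c v σ).er0 = if r == 0 then (if pvEmpty v && σ.er0.isNone then some (r, c) else σ.er0) else σ.er0 := by
  simp [pvCellStep, pvStepCol_er0, pvStepRow_er0]

theorem pvCell_er1 (u : String) (r c : Int) (v : String) (σ : PVSweep) : (pvCellStep u r c v σ).er1 = if r == 1 then (if pvEmpty v && σ.er1.isNone then some (r, c) else σ.er1) else σ.er1 := by
  simp [pvCellStep, pvStepCol_er1, pvStepRow_er1]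

theorem pvCell_er2 (u : String) (r c : Int) (v : String) (σ : PVSweep) : (pvCellStep u r c v σ).er2 = if r == 2 then (if pvEmpty v && σ.er2.isNone then some (r, c) else σ.er2) else σ.er2 := by
  simp [pvCellStep, pvStepCol_er2, pvStepRow_er2]

theorem pvCell_c0 (u : String) (r c : Int) (v : String) (σ : PVSweep) : (pvCellStep u r c v σ).c0 = if c == 0 then σ.c0 + pvMark u v else σ.c0 := by
  simp [pvCellStep, pvStepCol_c0, pvStepRow_c0]

theorem pvCell_c1 (u : String) (r c : Int) (v : String) (σ : PVSweep) : (pvCellStep u r c v σ).c1 = if c == 1 then σ.c1 + pvMark u v else σ.c1 := by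
  simp [pvCellStep, pvStepCol_c1, pvStepRow_c1]

theorem pvCell_c2 (u : String) (r c : Int) (v : String) (σ : PVSweep) : (pvCellStep u r c v σ).c2 = if c == 2 then σ.c2 + pvMark u v else σ.c2 := by
  simp [pvCellStep, pvStepCol_c2, pvStepRow_c2]

theorem pvCell_ec0 (u : String) (r c : Int) (v : String) (σ : PVSweep) : (pvCellStep u r c v σ).ec0 = if c == 0 then (if pvEmpty v && σ.ec0.isNone then some (r, c) else σ.ec0) else σ.ec0 := by
  simp [pvCellStep, pvStepCol_ec0, pvStepRow_ec0]

theorem pvCell_ec1 (u : String) (r c : Int) (v : String) (σ : PVSweep) : (pvCellStep u r c v σ).ec1 = if c == 1 then (if pvEmpty v && σ.ec1.isNone then some (r, c) else σ.ec1) else σ.ec1 := by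
  simp [pvCellStep, pvStepCol_ec1, pvStepRow_ec1]

theorem pvCell_ec2 (u : String) (r c : Int) (v : String) (σ : PVSweep) : (pvCellStep u r c v σ).ec2 = if c == 2 then (if pvEmpty v && σ.ec2.isNone then some (r, c) else σ.ec2) else σ.ec2 := by
  simp [pvCellStep, pvStepCol_ec2, pvStepRow_ec2]
-- projection lifting ----------------------------------------------------------

theorem pv_rowSweep_proj {β : Type} (p : PVSweep → β) (u : String) (f : Int → β → Int × String → β)
    (h : ∀ (r c : Int) (v : String) (σ : PVSweep), p (pvCellStep u r c v σ) = f r (p σ) (c, v)) :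
    ∀ (r : Int) (σ : PVSweep) (row : List String),
      p (pvRowSweep u r σ row) = (PySem.List.enumerate row 0).foldl (f r) (p σ) := by
  intro r σ row
  unfold pvRowSweep
  exact pv_foldl_proj p (fun σ (q : Int × String) => pvCellStep u r q.1 q.2 σ) (f r)
    (fun σ q => by have := h r q.1 q.2 σ; simpa using this) _ σ

theorem pv_sweep_proj {β : Type} (p : PVSweep → β) (u : String) (f : Int → β → Int × String → β)
    (h : ∀ (r c : Int) (v : String) (σ : PVSweep), p (pvCellStep u r c v σ) = f r (p σ) (c, v)) :
    ∀ (bv : List (List String)),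
      p (pvSweep u bv)
        = (PySem.List.enumerate bv 0).foldl
            (fun b (q : Int × List String) => (PySem.List.enumerate q.2 0).foldl (f q.1) b) (p pvInit) := by
  intro bv
  unfold pvSweep
  exact pv_foldl_proj p (fun σ (q : Int × List String) => pvRowSweep u q.1 σ q.2)
    (fun b (q : Int × List String) => (PySem.List.enumerate q.2 0).foldl (f q.1) b)
    (fun σ q => pv_rowSweep_proj p u f h q.1 σ q.2) _ _

theorem pv_inner_count (u : String) (row : List String) (b : Int) :
    (PySem.List.enumerate row 0).foldl (fun n p => n + pvMark u p.2) b
      = b + (row.countP (fun s => s == u) : Int) := by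
  rw [pv_foldl_enum_snd (fun n v => n + pvMark u v) row 0 b]
  simp only [pvMark]
  exact pv_foldl_count (fun v => v == u) row b

-- per-field characterisation of the sweep ------------------------------------

theorem pv_sweep_rowcount (u : String) (j : Int) (p : PVSweep → Int)
    (hcell : ∀ (r c : Int) (v : String) (σ : PVSweep),
      p (pvCellStep u r c v σ) = if r == j then p σ + pvMark u v else p σ)
    (hinit : p pvInit = 0) (hj : 0 ≤ j) :
    ∀ (bv : List (List String)) (hlt : j.toNat < bv.length),
      p (pvSweep u bv) = ((bv[j.toNat]'hlt).countP (fun s => s == u) : Int) := by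
  intro bv hlt
  rw [pv_sweep_proj p u (fun r n q => if r == j then n + pvMark u q.2 else n)
      (fun r c v σ => hcell r c v σ)]
  have hstep : (fun (b : Int) (q : Int × List String) =>
        (PySem.List.enumerate q.2 0).foldl
          (fun n qq => if q.1 == j then n + pvMark u qq.2 else n) b)
      = (fun b q => if q.1 == j then b + ((q.2.countP (fun s => s == u) : Nat) : Int) else b) := by
    funext b q
    by_cases h : (q.1 == j) = true
    · simp only [h, if_true]
      exact pv_inner_count u q.2 b
    · simp only [Bool.not_eq_true] at h
      simp only [h, Bool.false_eq_true, if_false]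
      exact pv_foldl_id _ b
  rw [hstep]
  have := pv_foldl_enum_single
    (fun (b : Int) (q : Int × List String) => b + ((q.2.countP (fun s => s == u) : Nat) : Int))
    j bv 0 (p pvInit) hj
  simp only [Int.sub_zero] at this
  rw [this, List.getElem?_eq_getElem hlt, hinit]
  simp

theorem pv_sweep_rowempty (u : String) (j : Int) (p : PVSweep → Option (Int × Int))
    (hcell : ∀ (r c : Int) (v : String) (σ : PVSweep),
      p (pvCellStep u r c v σ)
        = if r == j then (if pvEmpty v && (p σ).isNone then some (r, c) else p σ) else p σ)
    (hinit : p pvInit = none) (hj : 0 ≤ j) :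
    ∀ (bv : List (List String)) (hlt : j.toNat < bv.length),
      (p (pvSweep u bv)).isSome = (bv[j.toNat]'hlt).any pvEmpty := by
  intro bv hlt
  rw [pv_sweep_proj p u
      (fun r o q => if r == j then (if pvEmpty q.2 && o.isNone then some (r, q.1) else o) else o)
      (fun r c v σ => hcell r c v σ)]
  have hstep : (fun (o : Option (Int × Int)) (q : Int × List String) =>
        (PySem.List.enumerate q.2 0).foldl
          (fun o qq => if q.1 == j then (if pvEmpty qq.2 && o.isNone then some (q.1, qq.1) else o) else o) o)
      = (fun o q => if q.1 == j then
            ((PySem.List.enumerate q.2 0).foldl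
              (fun o qq => if pvEmpty qq.2 && o.isNone then some (j, qq.1) else o) o) else o) := by
    funext o q
    by_cases h : (q.1 == j) = true
    · have hq : q.1 = j := by simpa using h
      simp only [hq, beq_self_eq_true, if_true]
    · simp only [Bool.not_eq_true] at h
      simp only [h, Bool.false_eq_true, if_false]
      exact pv_foldl_id _ o
  rw [hstep]
  have := pv_foldl_enum_single
    (fun (o : Option (Int × Int)) (q : Int × List String) =>
      (PySem.List.enumerate q.2 0).foldl
        (fun o qq => if pvEmpty qq.2 && o.isNone then some (j, qq.1) else o) o)
    j bv 0 (p pvInit) hj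
  simp only [Int.sub_zero, List.getElem?_eq_getElem hlt] at this
  rw [hinit] at this ⊢
  rw [this]
  rw [pv_row_first_isSome pvEmpty j (PySem.List.enumerate (bv[j.toNat]'hlt) 0)]
  exact any_enumerate_snd pvEmpty _ 0

theorem pv_sweep_colcount (u : String) (j : Int) (p : PVSweep → Int)
    (hcell : ∀ (r c : Int) (v : String) (σ : PVSweep),
      p (pvCellStep u r c v σ) = if c == j then p σ + pvMark u v else p σ)
    (hinit : p pvInit = 0) (hj : 0 ≤ j)
    (bv : List (List String)) (hlen : ∀ row ∈ bv, j.toNat < row.length) :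
    p (pvSweep u bv)
      = (bv.countP (fun row => (PySem.List.pyGet? row j).getD "" == u) : Int) := by
  rw [pv_sweep_proj p u (fun r n q => if q.1 == j then n + pvMark u q.2 else n)
      (fun r c v σ => hcell r c v σ)]
  rw [PySem.List.foldl_congr_mem
      (g := fun (b : Int) (q : Int × List String) =>
        b + pvMark u ((PySem.List.pyGet? q.2 j).getD ""))]
  · rw [pv_foldl_enum_snd (fun b row => b + pvMark u ((PySem.List.pyGet? row j).getD "")) bv 0 _, hinit]
    simp only [pvMark]
    rw [pv_foldl_count (fun row => (PySem.List.pyGet? row j).getD "" == u) bv 0]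
    simp
  · intro b q hq
    have hmem : q.2 ∈ bv := by
      rcases (PySem.List.mem_enumerate_iff _ _ _).mp hq with ⟨k, hk, hqe⟩
      rw [hqe]
      exact List.getElem_mem _
    have hlt : j.toNat < q.2.length := hlen _ hmem
    have := pv_foldl_enum_single (fun (b : Int) (qq : Int × String) => b + pvMark u qq.2) j q.2 0 b hj
    simp only [Int.sub_zero] at this
    rw [this, List.getElem?_eq_getElem hlt]
    have hget : (PySem.List.pyGet? q.2 j).getD "" = q.2[j.toNat]'hlt := by
      rw [PySem.List.pyGet?_of_nonneg q.2 hj, List.getElem?_eq_getElem hlt]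
      rfl
    rw [hget]

theorem pv_sweep_colempty (u : String) (j : Int) (p : PVSweep → Option (Int × Int))
    (hcell : ∀ (r c : Int) (v : String) (σ : PVSweep),
      p (pvCellStep u r c v σ)
        = if c == j then (if pvEmpty v && (p σ).isNone then some (r, c) else p σ) else p σ)
    (hinit : p pvInit = none) (hj : 0 ≤ j)
    (bv : List (List String)) (hlen : ∀ row ∈ bv, j.toNat < row.length) :
    (p (pvSweep u bv)).isSome
      = bv.any (fun row => pvEmpty ((PySem.List.pyGet? row j).getD "")) := by
  rw [pv_sweep_proj p u
      (fun r o q => if q.1 == j then (if pvEmpty q.2 && o.isNone then some (r, q.1) else o) else o)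
      (fun r c v σ => hcell r c v σ)]
  rw [PySem.List.foldl_congr_mem
      (g := fun (o : Option (Int × Int)) (q : Int × List String) =>
        if pvEmpty ((PySem.List.pyGet? q.2 j).getD "") && o.isNone then some (q.1, j) else o)]
  · rw [hinit]
    rw [pv_col_first_isSome (fun row => pvEmpty ((PySem.List.pyGet? row j).getD "")) j
        (PySem.List.enumerate bv 0)]
    exact any_enumerate_snd (fun row => pvEmpty ((PySem.List.pyGet? row j).getD "")) bv 0
  · intro o q hq
    have hmem : q.2 ∈ bv := by
      rcases (PySem.List.mem_enumerate_iff _ _ _).mp hq with ⟨k, hk, hqe⟩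
      rw [hqe]
      exact List.getElem_mem _
    have hlt : j.toNat < q.2.length := hlen _ hmem
    have := pv_foldl_enum_single
      (fun (o : Option (Int × Int)) (qq : Int × String) =>
        if pvEmpty qq.2 && o.isNone then some (q.1, qq.1) else o) j q.2 0 o hj
    simp only [Int.sub_zero] at this
    rw [this, List.getElem?_eq_getElem hlt]
    have hget : (PySem.List.pyGet? q.2 j).getD "" = q.2[j.toNat]'hlt := by
      rw [PySem.List.pyGet?_of_nonneg q.2 hj, List.getElem?_eq_getElem hlt]
      rfl
    rw [hget]
-- A-side reductions -----------------------------------------------------------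

theorem foldl_count_p {α : Type} (p : α → Bool) (l : List α) : ∀ (acc : Int),
    List.foldl (fun counter x => if p x then counter + 1 else counter) acc l
      = acc + (List.countP p l : Int) := by
  induction l with
  | nil => intro acc; simp
  | cons x xs ih =>
    intro acc
    cases h : p x <;> simp [h, ih, List.countP_cons] <;> ring

theorem pv_foldl3_count (p : Int → Bool) :
    List.foldl (fun counter i => if p i then counter + 1 else counter) (0 : Int) [0, 1, 2]
      = ((0 + (if p 0 then (1 : Int) else 0)) + (if p 1 then 1 else 0)) + (if p 2 then 1 else 0) := by
  cases h0 : p 0 <;> cases h1 : p 1 <;> cases h2 : p 2 <;> simp [h0, h1, h2]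

theorem pv_countP3 {α : Type} (p : α → Bool) (x y z : α) :
    (((List.countP p [x, y, z] : Nat) : Int) == (2 : Int))
      = ((((0 : Int) + (if p x then 1 else 0)) + (if p y then 1 else 0)) + (if p z then 1 else 0)
          == (2 : Int)) := by
  cases hx : p x <;> cases hy : p y <;> cases hz : p z <;>
    simp [hx, hy, hz, List.countP_cons]

theorem rowA_eq (bv : List (List String)) (u : String) (i : Int) (row : List String)
    (hg : PySem.List.pyGet? bv i = some row) :
    (rowCheckP bv u i == 2 && (rowCheckCPUP bv i).isSome)
      = ((row.countP (fun s => s == u) == 2) && row.any (fun s => s != "X" && s != "O")) := by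
  unfold rowCheckP rowCheckCPUP
  rw [hg]
  simp only [Option.getD_some]
  rw [foldl_count_p (fun col => col == u) row 0, int_count_beq]
  rw [show (fun (p : Int × String) => if p.2 != "X" && p.2 != "O" then some (i, p.1) else none)
        = (fun (p : Int × String) => if (fun q : Int × String => q.2 != "X" && q.2 != "O") p
             then some ((fun q : Int × String => (i, q.1)) p) else none) from rfl]
  rw [isSome_findSome?_if]
  rw [any_enumerate_snd (fun s => s != "X" && s != "O") row 0]

theorem colA_eq (bv : List (List String)) (u : String) (c : Int) :
    (vertCheckP bv u c == 2 && (vertCheckCPUP bv c).isSome)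
      = ((bv.countP (fun row => (PySem.List.pyGet? row c).getD "" == u) == 2) &&
         bv.any (fun row => (PySem.List.pyGet? row c).getD "" != "X" &&
                            (PySem.List.pyGet? row c).getD "" != "O")) := by
  unfold vertCheckP vertCheckCPUP
  rw [foldl_count_p (fun row => (PySem.List.pyGet? row c).getD "" == u) bv 0, int_count_beq]
  rw [show (fun (p : Int × List String) =>
          if (PySem.List.pyGet? p.2 c).getD "" != "X" && (PySem.List.pyGet? p.2 c).getD "" != "O"
          then some (p.1, c) else none)
        = (fun (p : Int × List String) =>
            if (fun q : Int × List String =>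
                 (PySem.List.pyGet? q.2 c).getD "" != "X" && (PySem.List.pyGet? q.2 c).getD "" != "O") p
            then some ((fun q : Int × List String => (q.1, c)) p) else none) from rfl]
  rw [isSome_findSome?_if]
  rw [any_enumerate_snd
        (fun row => (PySem.List.pyGet? row c).getD "" != "X" && (PySem.List.pyGet? row c).getD "" != "O") bv 0]

theorem pv_chain (b1 b2 b3 b4 b5 b6 b7 b8 : Bool) :
    (if b1 || (b2 || b3) then true
     else if b4 || (b5 || b6) then true
     else if b7 then true
     else if b8 then true
     else false)
    = (if b1 then true else if b2 then true else if b3 then true else if b4 then true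
       else if b5 then true else if b6 then true else if b7 then true else if b8 then true
       else false) := by
  cases b1 <;> cases b2 <;> cases b3 <;> cases b4 <;> cases b5 <;> cases b6 <;>
    cases b7 <;> cases b8 <;> rfl

theorem hardCPUDefense_key (bv : List (List String)) (u v : String)
    (h3 : 3 ≤ bv.length) (hrows : ∀ row ∈ bv, 3 ≤ row.length) :
    hardCPUDefense bv u v = hardCPUDefense_alt bv u v := by
  rcases bv with _ | ⟨x0, bv⟩
  · simp at h3
  rcases bv with _ | ⟨x1, bv⟩
  · simp at h3
  rcases bv with _ | ⟨x2, rest⟩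
  · simp at h3
  have hg0 : PySem.List.pyGet? (x0 :: x1 :: x2 :: rest) 0 = some x0 := by
    rw [PySem.List.pyGet?_of_nonneg _ (by norm_num)]; rfl
  have hg1 : PySem.List.pyGet? (x0 :: x1 :: x2 :: rest) 1 = some x1 := by
    rw [PySem.List.pyGet?_of_nonneg _ (by norm_num)]; rfl
  have hg2 : PySem.List.pyGet? (x0 :: x1 :: x2 :: rest) 2 = some x2 := by
    rw [PySem.List.pyGet?_of_nonneg _ (by norm_num)]; rfl
  have hlen0 : ∀ row ∈ (x0 :: x1 :: x2 :: rest), (0 : Int).toNat < row.length := by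
    intro row hrow; have := hrows row hrow; omega
  have hlen1 : ∀ row ∈ (x0 :: x1 :: x2 :: rest), (1 : Int).toNat < row.length := by
    intro row hrow; have := hrows row hrow; omega
  have hlen2 : ∀ row ∈ (x0 :: x1 :: x2 :: rest), (2 : Int).toNat < row.length := by
    intro row hrow; have := hrows row hrow; omega
  -- B-side field values
  have br0 := pv_sweep_rowcount u 0 PVSweep.r0 (pvCell_r0 u) rfl (by norm_num)
    (x0 :: x1 :: x2 :: rest) (by simp)
  have br1 := pv_sweep_rowcount u 1 PVSweep.r1 (pvCell_r1 u) rfl (by norm_num)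
    (x0 :: x1 :: x2 :: rest) (by simp)
  have br2 := pv_sweep_rowcount u 2 PVSweep.r2 (pvCell_r2 u) rfl (by norm_num)
    (x0 :: x1 :: x2 :: rest) (by simp)
  have ber0 := pv_sweep_rowempty u 0 PVSweep.er0 (pvCell_er0 u) rfl (by norm_num)
    (x0 :: x1 :: x2 :: rest) (by simp)
  have ber1 := pv_sweep_rowempty u 1 PVSweep.er1 (pvCell_er1 u) rfl (by norm_num)
    (x0 :: x1 :: x2 :: rest) (by simp)
  have ber2 := pv_sweep_rowempty u 2 PVSweep.er2 (pvCell_er2 u) rfl (by norm_num)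
    (x0 :: x1 :: x2 :: rest) (by simp)
  have bc0 := pv_sweep_colcount u 0 PVSweep.c0 (pvCell_c0 u) rfl (by norm_num)
    (x0 :: x1 :: x2 :: rest) hlen0
  have bc1 := pv_sweep_colcount u 1 PVSweep.c1 (pvCell_c1 u) rfl (by norm_num)
    (x0 :: x1 :: x2 :: rest) hlen1
  have bc2 := pv_sweep_colcount u 2 PVSweep.c2 (pvCell_c2 u) rfl (by norm_num)
    (x0 :: x1 :: x2 :: rest) hlen2
  have bec0 := pv_sweep_colempty u 0 PVSweep.ec0 (pvCell_ec0 u) rfl (by norm_num)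
    (x0 :: x1 :: x2 :: rest) hlen0
  have bec1 := pv_sweep_colempty u 1 PVSweep.ec1 (pvCell_ec1 u) rfl (by norm_num)
    (x0 :: x1 :: x2 :: rest) hlen1
  have bec2 := pv_sweep_colempty u 2 PVSweep.ec2 (pvCell_ec2 u) rfl (by norm_num)
    (x0 :: x1 :: x2 :: rest) hlen2
  simp only [show ((0 : Int)).toNat = 0 from rfl, show ((1 : Int)).toNat = 1 from rfl,
    show ((2 : Int)).toNat = 2 from rfl, List.getElem_cons_zero, List.getElem_cons_succ]
    at br0 br1 br2 ber0 ber1 ber2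
  -- A side
  have hrr : PySem.List.pyRange 0 3 1 = [0, 1, 2] := by decide
  unfold hardCPUDefense crossCheckP crossCheckCPUP
  simp only [hrr,
    show (("left" : String) == "left" || ("left" : String) == "Left") = true from rfl,
    show (("right" : String) == "left" || ("right" : String) == "Left") = false from rfl,
    show (("right" : String) == "right" || ("right" : String) == "Right") = true from rfl,
    Bool.false_eq_true, if_true, if_false]
  simp only [List.any_cons, List.any_nil, Bool.or_false]
  rw [rowA_eq _ u 0 x0 hg0, rowA_eq _ u 1 x1 hg1, rowA_eq _ u 2 x2 hg2]
  rw [colA_eq _ u 0, colA_eq _ u 1, colA_eq _ u 2]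
  rw [pv_foldl3_count (fun i => (PySem.List.pyGet?
        ((PySem.List.pyGet? (x0 :: x1 :: x2 :: rest) i).getD []) i).getD "" == u)]
  rw [pv_foldl3_count (fun i => (PySem.List.pyGet?
        ((PySem.List.pyGet? (x0 :: x1 :: x2 :: rest) i).getD []) (2 - i)).getD "" == u)]
  rw [show (fun (i : Int) =>
        if (PySem.List.pyGet? ((PySem.List.pyGet? (x0 :: x1 :: x2 :: rest) i).getD []) i).getD "" != "X" &&
           (PySem.List.pyGet? ((PySem.List.pyGet? (x0 :: x1 :: x2 :: rest) i).getD []) i).getD "" != "O"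
        then some (i, i) else none)
      = (fun (i : Int) =>
          if (fun j : Int => (PySem.List.pyGet? ((PySem.List.pyGet? (x0 :: x1 :: x2 :: rest) j).getD []) j).getD "" != "X" &&
               (PySem.List.pyGet? ((PySem.List.pyGet? (x0 :: x1 :: x2 :: rest) j).getD []) j).getD "" != "O") i
          then some ((fun j : Int => (j, j)) i) else none) from rfl]
  rw [isSome_findSome?_if]
  rw [show (fun (i : Int) =>
        if (PySem.List.pyGet? ((PySem.List.pyGet? (x0 :: x1 :: x2 :: rest) i).getD []) (2 - i)).getD "" != "X" &&
           (PySem.List.pyGet? ((PySem.List.pyGet? (x0 :: x1 :: x2 :: rest) i).getD []) (2 - i)).getD "" != "O"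
        then some (i, 2 - i) else none)
      = (fun (i : Int) =>
          if (fun j : Int => (PySem.List.pyGet? ((PySem.List.pyGet? (x0 :: x1 :: x2 :: rest) j).getD []) (2 - j)).getD "" != "X" &&
               (PySem.List.pyGet? ((PySem.List.pyGet? (x0 :: x1 :: x2 :: rest) j).getD []) (2 - j)).getD "" != "O") i
          then some ((fun j : Int => (j, 2 - j)) i) else none) from rfl]
  rw [isSome_findSome?_if]
  simp only [List.any_cons, List.any_nil, Bool.or_false, hg0, hg1, hg2, Option.getD_some]
  -- B side
  simp only [hardCPUDefense_alt, br0, br1, br2, ber0, ber1, ber2, bc0, bc1, bc2,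
    bec0, bec1, bec2, pvDiag1, pvDiag2]
  simp only [show (fun (p : Int × Int) =>
        if pvCellAt (x0 :: x1 :: x2 :: rest) p != "X" && pvCellAt (x0 :: x1 :: x2 :: rest) p != "O"
        then some p else none)
      = (fun (p : Int × Int) =>
          if (fun q : Int × Int => pvCellAt (x0 :: x1 :: x2 :: rest) q != "X" &&
               pvCellAt (x0 :: x1 :: x2 :: rest) q != "O") p
          then some ((fun q : Int × Int => q) p) else none) from rfl,
    isSome_findSome?_if,
    pv_countP3 (fun p => pvCellAt (x0 :: x1 :: x2 :: rest) p == u) (0, 0) (1, 1) (2, 2),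
    pv_countP3 (fun p => pvCellAt (x0 :: x1 :: x2 :: rest) p == u) (0, 2) (1, 1) (2, 0)]
  simp only [pvCellAt, List.any_cons, List.any_nil, Bool.or_false,
    hg0, hg1, hg2, Option.getD_some, pv_cast_beq2, pvMark, pvEmpty]
  exact pv_chain _ _ _ _ _ _ _ _

-- ===== VERDICT (by name: the statement is the Claim_ definition above) =====
theorem hardCPUDefense_spec : Claim_equal_hardCPUDefense := by
  intro bv u v _ pre
  exact hardCPUDefense_key bv u v pre.1 pre.2
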